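-- pv_equiv track=rewrite | github.com/TheGhossst/Random-python | Problems/minimize_string.py | minimize_binary_string
-- ===== SOURCE A (Python) =====
-- def minimize_binary_string(S):
--     stack = []
--
--     for char in S:
--         if stack and stack[-1] == '1' and char == '0':
--             stack.pop()
--             while stack and stack[-1] == '1':
--                 stack.pop()
--             stack.append('0')
--         else:
--             stack.append(char)
--
--     return ''.join(stack)
-- ===== SOURCE B (Python) =====
-- def minimize_binary_string(S):
--     out = []
--     ones = 0
--     for char in S:
--         if char == '1':
--             ones += 1
--         elif char == '0':
--             ones = 0
--             out.append('0')
--         else: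
--             out.append('1' * ones)
--             ones = 0
--             out.append(char)
--     out.append('1' * ones)
--     return ''.join(out)
-- ===== Notes on version B (the rewrite author's own statement) =====
-- stated objective: simpler
-- what changed: Replaces the stack with its pop-loops by a single counter of pending one-bits that is dropped on a zero-bit and flushed before any other character, so no popping or stack inspection happens.
import Mathlib
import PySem

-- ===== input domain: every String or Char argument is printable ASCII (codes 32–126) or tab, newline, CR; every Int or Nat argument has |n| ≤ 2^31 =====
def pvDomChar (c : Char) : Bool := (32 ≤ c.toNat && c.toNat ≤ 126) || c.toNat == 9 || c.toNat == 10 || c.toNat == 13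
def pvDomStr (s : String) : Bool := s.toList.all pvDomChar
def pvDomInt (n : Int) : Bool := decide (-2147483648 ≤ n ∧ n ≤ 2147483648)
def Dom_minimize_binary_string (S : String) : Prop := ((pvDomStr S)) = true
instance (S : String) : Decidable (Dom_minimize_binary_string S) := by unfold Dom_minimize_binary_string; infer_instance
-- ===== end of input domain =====

-- B replaces A's stack (with its pop loop) by a counter of pending '1's; objective: simpler, same O(n) cost.

-- ===== PORT A =====
-- the inner `while stack and stack[-1]=='1': stack.pop()` loop
def pvPopOnes (s : List Char) : List Char :=
  if s.getLast? = some '1' then pvPopOnes s.dropLast else s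
termination_by s.length
decreasing_by
  rename_i h
  cases s with
  | nil => simp [List.getLast?] at h
  | cons a t => simp [List.length_dropLast]

def pvAStep (stack : List Char) (c : Char) : List Char :=
  if stack ≠ [] ∧ stack.getLast? = some '1' ∧ c = '0' then
    pvPopOnes stack.dropLast ++ ['0']
  else
    stack ++ [c]

def minimize_binary_string (S : String) : String :=
  String.ofList (S.toList.foldl pvAStep [])

-- ===== PORT B =====
-- state: (out, ones) — chars emitted so far and the count of pending '1's
def pvBStep (st : List Char × Nat) (c : Char) : List Char × Nat :=
  if c = '1' then (st.1, st.2 + 1)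
  else if c = '0' then (st.1 ++ ['0'], 0)
  else (st.1 ++ List.replicate st.2 '1' ++ [c], 0)

def minimize_binary_string_alt (S : String) : String :=
  let st := S.toList.foldl pvBStep ([], 0)
  String.ofList (st.1 ++ List.replicate st.2 '1')

-- ===== PRECONDITION & SPEC =====
def Spec_minimize_binary_string (S : String) (out : String) : Prop := out = minimize_binary_string_alt S
instance (S : String) (out : String) : Decidable (Spec_minimize_binary_string S out) := by unfold Spec_minimize_binary_string; infer_instance

-- ===== CLAIM (what is proved, stated in full; the proofs are below) =====
def Claim_equal_minimize_binary_string : Prop := ∀ (S : String), Dom_minimize_binary_string S → Spec_minimize_binary_string S (minimize_binary_string S)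

-- ===== LEMMAS AND PROOFS =====

theorem pvPopOnes_app_replicate (out : List Char) (h : out.getLast? ≠ some '1') :
    ∀ k, pvPopOnes (out ++ List.replicate k '1') = out := by
  intro k
  induction k with
  | zero => rw [pvPopOnes]; simp [h]
  | succ n ih =>
    rw [pvPopOnes]
    have hl : (out ++ List.replicate (n+1) '1').getLast? = some '1' := by
      rw [List.getLast?_append]
      simp [List.getLast?_replicate]
    rw [if_pos hl]
    have hd : (out ++ List.replicate (n+1) '1').dropLast = out ++ List.replicate n '1' := by
      rw [List.dropLast_append_of_ne_nil]
      · simp [List.dropLast_replicate]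
      · simp
    rw [hd, ih]

-- the invariant tying A's stack to B's (out, ones) state
def pvInv (stack : List Char) (st : List Char × Nat) : Prop :=
  stack = st.1 ++ List.replicate st.2 '1' ∧ st.1.getLast? ≠ some '1'

theorem pvStep_inv (stack : List Char) (st : List Char × Nat) (c : Char)
    (h : pvInv stack st) : pvInv (pvAStep stack c) (pvBStep st c) := by
  obtain ⟨heq, hlast⟩ := h
  obtain ⟨out, ones⟩ := st
  simp only at heq hlast
  by_cases h1 : c = '1'
  · -- push the '1' on both sides
    have hcond : ¬ (stack ≠ [] ∧ stack.getLast? = some '1' ∧ c = '0') := by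
      rintro ⟨-, -, hc⟩; rw [h1] at hc; exact absurd hc (by decide)
    constructor
    · simp [pvAStep, pvBStep, heq, h1, List.replicate_succ' (n := ones)]
    · simpa [pvBStep, h1] using hlast
  · by_cases h0 : c = '0'
    · cases ones with
      | zero =>
        -- no pending ones: A's condition is false, both append '0'
        have hst : stack = out := by simpa using heq
        have hcond : ¬ (stack ≠ [] ∧ stack.getLast? = some '1' ∧ c = '0') := by
          rintro ⟨-, hl, -⟩; exact hlast (by rwa [hst] at hl)
        constructor
        · have ha : pvAStep stack c = stack ++ [c] := by
            unfold pvAStep; rw [if_neg hcond]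
          subst h0 hst
          simp [ha, pvBStep]
        · simp [pvBStep, h0, List.getLast?_append]
      | succ n =>
        -- collapse: A pops the run of ones, both end with out ++ ['0']
        have hl : stack.getLast? = some '1' := by
          rw [heq, List.getLast?_append]; simp [List.getLast?_replicate]
        have hne : stack ≠ [] := by
          rw [heq]; simp [List.replicate_succ']
        have hd : stack.dropLast = out ++ List.replicate n '1' := by
          rw [heq, List.dropLast_append_of_ne_nil]
          · simp [List.dropLast_replicate]
          · simp
        constructor
        · have ha : pvAStep stack c = pvPopOnes stack.dropLast ++ ['0'] := by
            unfold pvAStep; rw [if_pos ⟨hne, hl, h0⟩]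
          rw [ha, hd, pvPopOnes_app_replicate out hlast]
          simp [pvBStep, h0]
        · simp [pvBStep, h0, List.getLast?_append]
    · -- other char: both flush the pending ones and append c
      have hcond : ¬ (stack ≠ [] ∧ stack.getLast? = some '1' ∧ c = '0') := by
        rintro ⟨-, -, hc⟩; exact h0 hc
      constructor
      · simp [pvAStep, pvBStep, heq, h1, h0]
      · simp [pvBStep, h1, h0, List.getLast?_append]

theorem pvFold_inv (l : List Char) :
    ∀ (stack : List Char) (st : List Char × Nat), pvInv stack st →
      pvInv (l.foldl pvAStep stack) (l.foldl pvBStep st) := by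
  induction l with
  | nil => intro _ _ h; exact h
  | cons c t ih => intro stack st h; exact ih _ _ (pvStep_inv stack st c h)

-- ===== VERDICT (by name: the statement is the Claim_ definition above) =====
theorem minimize_binary_string_spec : Claim_equal_minimize_binary_string := by
  intro S _
  unfold Spec_minimize_binary_string minimize_binary_string minimize_binary_string_alt
  have h := pvFold_inv S.toList [] ([], 0) (by simp [pvInv])
  simp only [pvInv] at h
  rw [h.1]
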